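-- pv_equiv track=rewrite | github.com/allrob23/pymop-artifacts-rv | Experiment_Data/Discussion/Garbage_Collection/generate-gc-macros.py | count_multiple_objects_specs
-- ===== SOURCE A (Python) =====
-- spec_names = [
--     "faulthandler_disableBeforeClose",
--     "faulthandler_tracetrackDumpBeforeClose",
--     "faulthandler_unregisterBeforeClose",
--     "File_MustClose",
--     "Flask_NoModifyAfterServe",
--     "Flask_NoOptionsChangeAfterEnvCreate",
--     "Flask_UnsafeFilePath",
--     "Pydocs_MustCloseSocket",
--     "Pydocs_MustFlushMmap",
--     "PyDocs_MustOnlyUseDictReader",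
--     "Pydocs_MustReleaseLock",
--     "Pydocs_MustReleaseRLock",
--     "Pydocs_MustShutdownProcessPoolExecutor",
--     "Pydocs_MustShutdownThreadPoolExecutor",
--     "PyDocs_MustSortBeforeGroupBy",
--     "Pydocs_MustUnlinkSharedMemory",
--     "PyDocs_MustWaitForPopenToFinish",
--     "Pydocs_NoReadAfterAccess",
--     "Pydocs_ShouldUseStreamWriterCorrectly",
--     "PyDocs_UnsafeIterUseAfterTee",
--     "Pydocs_UselessFileOpen",
--     "Pydocs_UselessProcessPoolExecutor",
--     "Pydocs_UselessThreadPoolExecutor",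
--     "Requests_MustCloseSession",
--     "UnsafeArrayIterator",
--     "UnsafeListIterator",
--     "UnsafeMapIterator",
--     "XMLParser_ParseMustFinalize",
-- ]
--
-- def count_multiple_objects_specs(event_dict):
--     if not isinstance(event_dict, dict):
--         return 0, 0
--     else:
--         spec_count = 0
--         events_count = 0
--         for spec, event_count in event_dict.items():
--             if spec in spec_names:
--                 spec_count += 1
--                 events_count += event_count
--         return spec_count, events_count
-- ===== SOURCE B (Python) =====
-- spec_names = [
--     "faulthandler_disableBeforeClose",
--     "faulthandler_tracetrackDumpBeforeClose",
--     "faulthandler_unregisterBeforeClose",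
--     "File_MustClose",
--     "Flask_NoModifyAfterServe",
--     "Flask_NoOptionsChangeAfterEnvCreate",
--     "Flask_UnsafeFilePath",
--     "Pydocs_MustCloseSocket",
--     "Pydocs_MustFlushMmap",
--     "PyDocs_MustOnlyUseDictReader",
--     "Pydocs_MustReleaseLock",
--     "Pydocs_MustReleaseRLock",
--     "Pydocs_MustShutdownProcessPoolExecutor",
--     "Pydocs_MustShutdownThreadPoolExecutor",
--     "PyDocs_MustSortBeforeGroupBy",
--     "Pydocs_MustUnlinkSharedMemory",
--     "PyDocs_MustWaitForPopenToFinish",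
--     "Pydocs_NoReadAfterAccess",
--     "Pydocs_ShouldUseStreamWriterCorrectly",
--     "PyDocs_UnsafeIterUseAfterTee",
--     "Pydocs_UselessFileOpen",
--     "Pydocs_UselessProcessPoolExecutor",
--     "Pydocs_UselessThreadPoolExecutor",
--     "Requests_MustCloseSession",
--     "UnsafeArrayIterator",
--     "UnsafeListIterator",
--     "UnsafeMapIterator",
--     "XMLParser_ParseMustFinalize",
-- ]
--
-- def count_multiple_objects_specs(event_dict):
--     if not isinstance(event_dict, dict):
--         return 0, 0
--     hits = [event_dict[name] for name in spec_names if name in event_dict]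
--     return len(hits), sum(hits)
-- ===== Notes on version B (the rewrite author's own statement) =====
-- stated objective: faster
-- what changed: B flips the traversal and decomposition: instead of A's single accumulator loop over the dict with a linear membership test in spec_names per key, B builds the list of event counts of the matched spec names by a comprehension over the fixed 28-name spec_names (one O(1) dict lookup each) and returns its len and sum.
import Mathlib
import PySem

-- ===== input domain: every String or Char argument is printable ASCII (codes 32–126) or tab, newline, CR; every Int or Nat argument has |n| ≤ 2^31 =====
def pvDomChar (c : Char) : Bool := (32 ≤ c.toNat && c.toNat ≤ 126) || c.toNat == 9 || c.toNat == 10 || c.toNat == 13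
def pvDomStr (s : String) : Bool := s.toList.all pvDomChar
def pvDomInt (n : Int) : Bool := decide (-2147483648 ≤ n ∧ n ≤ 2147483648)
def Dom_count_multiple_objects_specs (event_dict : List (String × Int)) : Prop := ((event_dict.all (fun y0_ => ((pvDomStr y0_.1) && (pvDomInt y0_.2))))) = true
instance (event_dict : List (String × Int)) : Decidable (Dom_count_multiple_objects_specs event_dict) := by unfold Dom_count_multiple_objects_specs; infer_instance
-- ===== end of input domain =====

-- B flips the traversal and the decomposition: it builds the list of event counts of the matched
-- spec names by mapping over the fixed spec_names list (one dict lookup each) and returns its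
-- length and sum, instead of A's accumulator loop over the dict with a list-membership test per
-- key (return value only; the isinstance guard is vacuous under the typed signature).

-- the module-level constant spec_names (shared context of A and B)
def specNames : List String := [
  "faulthandler_disableBeforeClose",
  "faulthandler_tracetrackDumpBeforeClose",
  "faulthandler_unregisterBeforeClose",
  "File_MustClose",
  "Flask_NoModifyAfterServe",
  "Flask_NoOptionsChangeAfterEnvCreate",
  "Flask_UnsafeFilePath",
  "Pydocs_MustCloseSocket",
  "Pydocs_MustFlushMmap",
  "PyDocs_MustOnlyUseDictReader",
  "Pydocs_MustReleaseLock",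
  "Pydocs_MustReleaseRLock",
  "Pydocs_MustShutdownProcessPoolExecutor",
  "Pydocs_MustShutdownThreadPoolExecutor",
  "PyDocs_MustSortBeforeGroupBy",
  "Pydocs_MustUnlinkSharedMemory",
  "PyDocs_MustWaitForPopenToFinish",
  "Pydocs_NoReadAfterAccess",
  "Pydocs_ShouldUseStreamWriterCorrectly",
  "PyDocs_UnsafeIterUseAfterTee",
  "Pydocs_UselessFileOpen",
  "Pydocs_UselessProcessPoolExecutor",
  "Pydocs_UselessThreadPoolExecutor",
  "Requests_MustCloseSession",
  "UnsafeArrayIterator",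
  "UnsafeListIterator",
  "UnsafeMapIterator",
  "XMLParser_ParseMustFinalize"]

-- ===== PORT A =====
-- for spec, event_count in event_dict.items(): if spec in spec_names: spec_count += 1; events_count += event_count
def count_multiple_objects_specs (event_dict : List (String × Int)) : Int × Int :=
  event_dict.foldl
    (fun acc p => if p.1 ∈ specNames then (acc.1 + 1, acc.2 + p.2) else acc)
    (0, 0)

-- ===== PORT B =====
-- hits = [event_dict[name] for name in spec_names if name in event_dict]; return len(hits), sum(hits)
def count_multiple_objects_specs_alt (event_dict : List (String × Int)) : Int × Int :=
  let hits := specNames.filterMap (fun name => List.lookup name event_dict)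
  ((hits.length : Int), hits.sum)

-- ===== PRECONDITION & SPEC =====
-- Pre_ requires pairwise-distinct keys: a Python dict cannot contain duplicate keys, so an
-- association list with repeated keys corresponds to no input the Python functions ever receive.
def Pre_count_multiple_objects_specs (event_dict : List (String × Int)) : Prop :=
  (event_dict.map Prod.fst).Nodup

instance (event_dict : List (String × Int)) : Decidable (Pre_count_multiple_objects_specs event_dict) := by
  unfold Pre_count_multiple_objects_specs; infer_instance

def pvWitness_count_multiple_objects_specs : (List (String × Int)) :=
  [("File_MustClose", 3), ("not_a_spec", 7), ("UnsafeMapIterator", -2)]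

def Spec_count_multiple_objects_specs (event_dict : List (String × Int)) (out : Int × Int) : Prop := out = count_multiple_objects_specs_alt event_dict
instance (event_dict : List (String × Int)) (out : Int × Int) : Decidable (Spec_count_multiple_objects_specs event_dict out) := by unfold Spec_count_multiple_objects_specs; infer_instance

-- ===== CLAIM (what is proved, stated in full; the proofs are below) =====
def Claim_equal_count_multiple_objects_specs : Prop := ∀ (event_dict : List (String × Int)), Dom_count_multiple_objects_specs event_dict → Pre_count_multiple_objects_specs event_dict → Spec_count_multiple_objects_specs event_dict (count_multiple_objects_specs event_dict)

-- ===== LEMMAS AND PROOFS =====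

-- contribution of one dict entry to A's totals
def pvDeltaA (specs : List String) (p : String × Int) : Int × Int :=
  if p.1 ∈ specs then (1, p.2) else 0

-- contribution of one spec name to B's totals
def pvDeltaB (event_dict : List (String × Int)) (s : String) : Int × Int :=
  match List.lookup s event_dict with
  | some v => (1, v)
  | none => 0

theorem pvFoldA_eq (specs : List String) (l : List (String × Int)) (a : Int × Int) :
    l.foldl (fun acc p => if p.1 ∈ specs then (acc.1 + 1, acc.2 + p.2) else acc) a
      = a + (l.map (pvDeltaA specs)).sum := by
  induction l generalizing a with
  | nil => simp
  | cons p t ih =>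
    simp only [List.foldl_cons, List.map_cons, List.sum_cons, ih, pvDeltaA]
    split_ifs with h
    · cases a; simp [add_comm, add_left_comm]
    · simp

theorem pvSumMapAdd {α M : Type} [AddCommMonoid M] (f g : α → M) (l : List α) :
    (l.map (fun x => f x + g x)).sum = (l.map f).sum + (l.map g).sum := by
  induction l with
  | nil => simp
  | cons x t ih => simp [ih, add_assoc, add_left_comm]

-- the single-key slice of A's sum equals B's contribution for that key, given distinct keys
theorem pvSingleKey (s : String) (d : List (String × Int))
    (hd : (d.map Prod.fst).Nodup) :
    (d.map (fun p => if p.1 = s then ((1 : Int), p.2) else 0)).sum = pvDeltaB d s := by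
  induction d with
  | nil => simp [pvDeltaB]
  | cons p t ih =>
    obtain ⟨k, v⟩ := p
    simp only [List.map_cons, List.nodup_cons] at hd
    simp only [List.map_cons, List.sum_cons]
    by_cases hk : k = s
    · subst hk
      have hz : (t.map (fun p => if p.1 = k then ((1 : Int), p.2) else 0)).sum = 0 := by
        apply List.sum_eq_zero
        intro x hx
        simp only [List.mem_map] at hx
        obtain ⟨q, hq, rfl⟩ := hx
        have : q.1 ≠ k := fun h => hd.1 (h ▸ List.mem_map_of_mem hq)
        simp [this]
      simp [pvDeltaB, List.lookup, hz]
    · have := ih hd.2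
      have hbe : (s == k) = false := by simp [Ne.symm hk]
      simp only [pvDeltaB, List.lookup, hbe] at this ⊢
      simpa [hk] using this

-- A's sum over the dict, re-bucketed by spec name
theorem pvSumEq (specs : List String) (d : List (String × Int))
    (hs : specs.Nodup) (hd : (d.map Prod.fst).Nodup) :
    (d.map (pvDeltaA specs)).sum = (specs.map (pvDeltaB d)).sum := by
  induction specs with
  | nil =>
    apply List.sum_eq_zero
    intro x hx
    simp only [List.mem_map] at hx
    obtain ⟨q, _, rfl⟩ := hx
    simp [pvDeltaA]
  | cons s rest ih =>
    simp only [List.nodup_cons] at hs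
    have hsplit : pvDeltaA (s :: rest)
          = fun p => (if p.1 = s then ((1 : Int), p.2) else 0) + pvDeltaA rest p := by
      funext p
      by_cases h1 : p.1 = s
      · subst h1
        simp [pvDeltaA, hs.1]
      · simp [pvDeltaA, h1]
    calc (d.map (pvDeltaA (s :: rest))).sum
        = (d.map (fun p => (if p.1 = s then ((1 : Int), p.2) else 0) + pvDeltaA rest p)).sum := by
          rw [hsplit]
      _ = (d.map (fun p => if p.1 = s then ((1 : Int), p.2) else 0)).sum
            + (d.map (pvDeltaA rest)).sum := pvSumMapAdd _ _ _
      _ = pvDeltaB d s + (rest.map (pvDeltaB d)).sum := by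
          rw [pvSingleKey s d hd, ih hs.2]
      _ = ((s :: rest).map (pvDeltaB d)).sum := by simp

-- the per-name sum equals (length, sum) of the comprehension's hits list
theorem pvHits_eq (d : List (String × Int)) (l : List String) :
    (l.map (pvDeltaB d)).sum
      = (((l.filterMap (fun n => List.lookup n d)).length : Int),
         (l.filterMap (fun n => List.lookup n d)).sum) := by
  induction l with
  | nil => simp [Prod.ext_iff]
  | cons s t ih =>
    simp only [List.map_cons, List.sum_cons, List.filterMap_cons, ih, pvDeltaB]
    cases h : List.lookup s d with
    | none => simp
    | some v =>
      simp only [List.length_cons, List.sum_cons, Prod.mk_add_mk, Prod.ext_iff]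
      exact ⟨by push_cast; ring, trivial⟩

theorem pvSpecNamesNodup : specNames.Nodup := by decide

-- ===== VERDICT (by name: the statement is the Claim_ definition above) =====
theorem count_multiple_objects_specs_spec : Claim_equal_count_multiple_objects_specs := by
  intro d _ hpre
  unfold Spec_count_multiple_objects_specs count_multiple_objects_specs count_multiple_objects_specs_alt
  rw [pvFoldA_eq, pvSumEq specNames d pvSpecNamesNodup hpre, pvHits_eq]
  simp
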